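-- pv_equiv track=rewrite | github.com/nayonikasen/pathweaver | person2_smoke.py | count_vertex_conflicts
-- ===== SOURCE A (Python) =====
-- def count_vertex_conflicts(paths):
--     if not paths:
--         return 0
--     max_t = max(len(p) for p in paths)
--
--     def pos_at(path, t):
--         if not path:
--             return None
--         return path[min(t, len(path) - 1)]
--
--     count = 0
--     for t in range(max_t):
--         for i in range(len(paths)):
--             for j in range(i + 1, len(paths)):
--                 pi = pos_at(paths[i], t)
--                 pj = pos_at(paths[j], t)
--                 if pi is not None and pj is not None and pi == pj:
--                     count += 1
--     return count
-- ===== SOURCE B (Python) =====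
-- def count_vertex_conflicts(paths):
--     if not paths:
--         return 0
--     max_t = max(len(p) for p in paths)
--     total = 0
--     for t in range(max_t):
--         cnt = {}
--         for p in paths:
--             if p:
--                 v = p[min(t, len(p) - 1)]
--                 cnt[v] = cnt.get(v, 0) + 1
--         for k in cnt.values():
--             total += k * (k - 1) // 2
--     return total
-- ===== Notes on version B (the rewrite author's own statement) =====
-- stated objective: faster
-- what changed: Replaced A's per-timestep scan over all O(N^2) path pairs by a per-timestep dict of position counts, adding k*(k-1)//2 conflicts per occupied vertex.
import Mathlib
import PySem

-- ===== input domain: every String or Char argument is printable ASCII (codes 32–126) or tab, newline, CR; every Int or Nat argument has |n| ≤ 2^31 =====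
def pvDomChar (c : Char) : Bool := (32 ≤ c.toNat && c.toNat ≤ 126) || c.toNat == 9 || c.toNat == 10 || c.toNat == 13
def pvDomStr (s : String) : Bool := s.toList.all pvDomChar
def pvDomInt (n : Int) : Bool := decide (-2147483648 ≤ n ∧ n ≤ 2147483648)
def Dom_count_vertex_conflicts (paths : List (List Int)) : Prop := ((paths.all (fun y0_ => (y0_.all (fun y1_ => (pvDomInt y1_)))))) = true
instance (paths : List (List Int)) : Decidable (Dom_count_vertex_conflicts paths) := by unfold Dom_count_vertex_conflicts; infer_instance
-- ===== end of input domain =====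

-- B replaces A's O(T·N²) all-pairs scan per timestep by an O(T·N) counting dict, summing k·(k-1)//2 per vertex; return values proved equal.

-- ===== PORT A =====
-- pos_at helper of A: None for an empty path, else path[min(t, len(path)-1)]
def pvPosAt (path : List Int) (t : Int) : Option Int :=
  if path = [] then none
  else PySem.List.pyGet? path (min t ((path.length : Int) - 1))

def count_vertex_conflicts (paths : List (List Int)) : Int :=
  if paths = [] then 0
  else
    let max_t := ((PySem.List.max? (paths.map (fun (p : List Int) => (p.length : Int))) id).getD 0)
    (PySem.List.pyRange 0 max_t).foldl (fun count t =>
      (PySem.List.pyRange 0 (paths.length : Int)).foldl (fun count i =>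
        (PySem.List.pyRange (i + 1) (paths.length : Int)).foldl (fun count j =>
          let pi := pvPosAt (PySem.List.pyGetD paths i []) t
          let pj := pvPosAt (PySem.List.pyGetD paths j []) t
          if pi.isSome && pj.isSome && pi == pj then count + 1 else count) count) count) 0

-- ===== PORT B =====
-- B's p[min(t, len(p)-1)] for a nonempty path (index always in range there)
def pvPosB (p : List Int) (t : Int) : Int :=
  PySem.List.pyGetD p (min t ((p.length : Int) - 1)) 0

def count_vertex_conflicts_alt (paths : List (List Int)) : Int :=
  if paths = [] then 0
  else
    let max_t := ((PySem.List.max? (paths.map (fun (p : List Int) => (p.length : Int))) id).getD 0)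
    (PySem.List.pyRange 0 max_t).foldl (fun total t =>
      let cnt := paths.foldl (fun d p =>
        if p = [] then d
        else
          let v := pvPosB p t
          d.insert v (d.getD v 0 + 1)) PySem.Dict.empty
      cnt.values.foldl (fun total k => total + PySem.Int.floordiv (k * (k - 1)) 2) total) 0

-- ===== PRECONDITION & SPEC =====
def Spec_count_vertex_conflicts (paths : List (List Int)) (out : Int) : Prop := out = count_vertex_conflicts_alt paths
instance (paths : List (List Int)) (out : Int) : Decidable (Spec_count_vertex_conflicts paths out) := by unfold Spec_count_vertex_conflicts; infer_instance

-- ===== CLAIM (what is proved, stated in full; the proofs are below) =====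
def Claim_equal_count_vertex_conflicts : Prop := ∀ (paths : List (List Int)), Dom_count_vertex_conflicts paths → Spec_count_vertex_conflicts paths (count_vertex_conflicts paths)

-- ===== LEMMAS AND PROOFS =====

-- number of pairs i < j with equal entries, counted head-first as A's loop does
def pvPairs : List Int → Int
  | [] => 0
  | x :: r => (r.count x : Int) + pvPairs r

-- pair count relative to an arbitrary matching predicate (A's loop over whole paths)
def pvPairsP {α : Type} (ok : α → α → Bool) : List α → Int
  | [] => 0
  | x :: r => (r.countP (ok x) : Int) + pvPairsP ok r

def pvTri (k : Int) : Int := PySem.Int.floordiv (k * (k - 1)) 2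

-- positions of the nonempty paths at time t, in path order
def pvVals (paths : List (List Int)) (t : Int) : List Int :=
  paths.filterMap (fun p => if p = [] then none else some (pvPosB p t))

theorem pvTri_step (k : Int) : pvTri (k + 1) = pvTri k + k := by
  unfold pvTri
  rw [PySem.Int.floordiv_eq_ediv_of_pos (by norm_num), PySem.Int.floordiv_eq_ediv_of_pos (by norm_num)]
  have h : (k + 1) * (k + 1 - 1) = k * (k - 1) + k * 2 := by ring
  rw [h, Int.add_mul_ediv_right _ _ (by norm_num)]

theorem pvPosAt_eq (p : List Int) (t : Int) (hp : p ≠ []) (ht : 0 ≤ t) :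
    pvPosAt p t = some (pvPosB p t) := by
  have hlen : 0 < p.length := List.length_pos_of_ne_nil hp
  have h0 : 0 ≤ min t ((p.length : Int) - 1) := by omega
  have h1 : min t ((p.length : Int) - 1) < (p.length : Int) := by omega
  simp only [pvPosAt, pvPosB, if_neg hp]
  obtain ⟨n, hn⟩ : ∃ n : Nat, min t ((p.length : Int) - 1) = (n : Int) :=
    ⟨(min t ((p.length : Int) - 1)).toNat, by omega⟩
  rw [hn, PySem.List.pyGet?_natCast, PySem.List.pyGetD_natCast]
  have hlt : n < p.length := by omega
  rw [List.getElem?_eq_getElem hlt]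
  simp [List.getD, List.getElem?_eq_getElem hlt]

-- ---- A's per-timestep count ----

theorem pvPairsP_sum {α : Type} (ok : α → α → Bool) (d : α) (l : List α) :
    ((List.range l.length).map
      (fun i => (((l.drop (i + 1)).countP (ok (l.getD i d))) : Int))).sum = pvPairsP ok l := by
  induction l with
  | nil => simp [pvPairsP]
  | cons x r ih =>
    rw [List.length_cons, List.range_succ_eq_map]
    simp only [List.map_cons, List.map_map, List.sum_cons]
    have : (List.map ((fun i => ((((x :: r).drop (i + 1)).countP (ok ((x :: r).getD i d))) : Int)) ∘ Nat.succ) (List.range r.length)) =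
        (List.map (fun i => (((r.drop (i + 1)).countP (ok (r.getD i d))) : Int)) (List.range r.length)) := by
      apply List.map_congr_left
      intro i _
      simp [Function.comp, List.getD]
    rw [this, ih]
    simp [pvPairsP, List.getD]

theorem pvInner_eq (paths : List (List Int)) (t : Int) (i : Int) (hi : 0 ≤ i) (c : Int) :
    (PySem.List.pyRange (i + 1) (paths.length : Int)).foldl (fun count j =>
        let pi := pvPosAt (PySem.List.pyGetD paths i []) t
        let pj := pvPosAt (PySem.List.pyGetD paths j []) t
        if pi.isSome && pj.isSome && pi == pj then count + 1 else count) c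
      = c + (((paths.drop (i + 1).toNat).countP (fun q =>
          (pvPosAt (PySem.List.pyGetD paths i []) t).isSome && (pvPosAt q t).isSome &&
            pvPosAt (PySem.List.pyGetD paths i []) t == pvPosAt q t)) : Int) := by
  rw [PySem.List.foldl_pyRange_pyGetD' paths []
    (fun count q =>
      if (pvPosAt (PySem.List.pyGetD paths i []) t).isSome && (pvPosAt q t).isSome &&
          pvPosAt (PySem.List.pyGetD paths i []) t == pvPosAt q t then count + 1 else count) c (by omega)]
  rw [PySem.List.foldl_count_if]

theorem pvA_t (paths : List (List Int)) (t : Int) (c : Int) :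
    (PySem.List.pyRange 0 (paths.length : Int)).foldl (fun count i =>
      (PySem.List.pyRange (i + 1) (paths.length : Int)).foldl (fun count j =>
        let pi := pvPosAt (PySem.List.pyGetD paths i []) t
        let pj := pvPosAt (PySem.List.pyGetD paths j []) t
        if pi.isSome && pj.isSome && pi == pj then count + 1 else count) count) c
    = c + pvPairsP (fun p q => (pvPosAt p t).isSome && (pvPosAt q t).isSome && pvPosAt p t == pvPosAt q t) paths := by
  rw [PySem.List.foldl_congr_mem _ _
    (fun count i => count + (((paths.drop (i + 1).toNat).countP (fun q =>
        (pvPosAt (PySem.List.pyGetD paths i []) t).isSome && (pvPosAt q t).isSome &&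
          pvPosAt (PySem.List.pyGetD paths i []) t == pvPosAt q t)) : Int)) c
    (by
      intro acc i hi
      have h0 : 0 ≤ i := (PySem.List.mem_pyRange_one.mp hi).1
      exact pvInner_eq paths t i h0 acc)]
  rw [PySem.List.foldl_add]
  congr 1
  rw [PySem.List.pyRange_zero_nat paths.length, List.map_map]
  rw [List.map_congr_left (g := fun i : Nat => (((paths.drop (i + 1)).countP (fun q =>
        (pvPosAt (paths.getD i []) t).isSome && (pvPosAt q t).isSome &&
          pvPosAt (paths.getD i []) t == pvPosAt q t)) : Int))
    (by
      intro i hi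
      simp only [Function.comp, PySem.List.pyGetD_natCast]
      have h1 : ((i : Int) + 1).toNat = i + 1 := by omega
      rw [h1])]
  simpa using pvPairsP_sum (fun p q => (pvPosAt p t).isSome && (pvPosAt q t).isSome && pvPosAt p t == pvPosAt q t) [] paths

theorem pvVals_cons (p : List Int) (r : List (List Int)) (t : Int) :
    pvVals (p :: r) t = if p = [] then pvVals r t else pvPosB p t :: pvVals r t := by
  by_cases hp : p = [] <;> simp [pvVals, hp]

theorem pvCountP_vals (t : Int) (ht : 0 ≤ t) (v : Int) (l : List (List Int)) :
    (l.countP (fun q => (pvPosAt q t).isSome && (some v == pvPosAt q t))) = (pvVals l t).count v := by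
  induction l with
  | nil => simp [pvVals]
  | cons q r ih =>
    rw [pvVals_cons, List.countP_cons]
    by_cases hq : q = []
    · have hfalse : ((pvPosAt q t).isSome && (some v == pvPosAt q t)) = false := by
        subst hq; simp [pvPosAt]
      rw [if_pos hq, hfalse, ih]
      simp
    · rw [if_neg hq, List.count_cons, ih, pvPosAt_eq q t hq ht]
      by_cases h : pvPosB q t = v
      · simp [h]
      · simp [h, Ne.symm h]

theorem pvPairsP_eq_pvPairs (paths : List (List Int)) (t : Int) (ht : 0 ≤ t) :
    pvPairsP (fun p q => (pvPosAt p t).isSome && (pvPosAt q t).isSome && pvPosAt p t == pvPosAt q t) paths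
      = pvPairs (pvVals paths t) := by
  induction paths with
  | nil => simp [pvPairsP, pvVals, pvPairs]
  | cons p r ih =>
    rw [pvVals_cons]
    simp only [pvPairsP]
    by_cases hp : p = []
    · have hfalse : (fun q => (pvPosAt p t).isSome && (pvPosAt q t).isSome && pvPosAt p t == pvPosAt q t) = (fun _ => false) := by
        funext q; subst hp; simp [pvPosAt]
      rw [if_pos hp, hfalse, ih]
      simp
    · rw [if_neg hp]
      simp only [pvPairs]
      rw [ih]
      congr 1
      rw [← pvCountP_vals t ht (pvPosB p t) r]
      congr 1
      apply List.countP_congr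
      intro q _
      rw [pvPosAt_eq p t hp ht]
      simp

-- ---- B's per-timestep count ----

theorem pvB_fold_eq (paths : List (List Int)) (t : Int) (d : PySem.Dict Int Int) :
    paths.foldl (fun d p =>
        if p = [] then d
        else
          let v := pvPosB p t
          d.insert v (d.getD v 0 + 1)) d
      = (pvVals paths t).foldl (fun d v => d.insert v (d.getD v 0 + 1)) d := by
  induction paths generalizing d with
  | nil => simp [pvVals]
  | cons p r ih =>
    rw [pvVals_cons, List.foldl_cons]
    by_cases hp : p = []
    · simp only [if_pos hp]
      exact ih d
    · simp only [if_neg hp, List.foldl_cons]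
      exact ih _

theorem pvPairs_append (vs : List Int) (x : Int) :
    pvPairs (vs ++ [x]) = pvPairs vs + (vs.count x : Int) := by
  induction vs with
  | nil => simp [pvPairs]
  | cons y r ih =>
    simp only [List.cons_append, pvPairs, ih, List.count_append, List.count_cons]
    by_cases h : x = y
    · simp [h]; ring
    · have h2 : ¬ y = x := fun e => h e.symm
      simp [h, h2]; ring

theorem pvPairs_eq_finset_sum (vs : List Int) :
    pvPairs vs = vs.toFinset.sum (fun v => pvTri ((vs.count v : Int))) := by
  induction vs using List.reverseRecOn with
  | nil => simp [pvPairs]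
  | append_singleton r x ih =>
    rw [pvPairs_append, ih]
    have hcnt : ∀ v : Int, (((r ++ [x]).count v : Int)) = (r.count v : Int) + if v = x then 1 else 0 := by
      intro v
      rw [List.count_append]
      by_cases h : v = x
      · simp [h]
      · have h2 : ¬ x = v := fun e => h e.symm
        simp [h, h2]
    by_cases hx : x ∈ r
    · have hxT : x ∈ r.toFinset := List.mem_toFinset.mpr hx
      have hT : (r ++ [x]).toFinset = r.toFinset := by
        simp [List.toFinset_append, Finset.insert_eq_self.mpr hxT]
      have herase : (∑ v ∈ r.toFinset.erase x, pvTri (((r ++ [x]).count v : Int)))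
          = (∑ v ∈ r.toFinset.erase x, pvTri ((r.count v : Int))) := by
        apply Finset.sum_congr rfl
        intro v hv
        rw [hcnt v, if_neg (Finset.mem_erase.mp hv).1, add_zero]
      have e1 : (∑ v ∈ (r ++ [x]).toFinset, pvTri (((r ++ [x]).count v : Int)))
          = (∑ v ∈ r.toFinset.erase x, pvTri (((r ++ [x]).count v : Int))) + pvTri (((r ++ [x]).count x : Int)) := by
        rw [hT]; exact (Finset.sum_erase_add _ _ hxT).symm
      have e2 : (∑ v ∈ r.toFinset, pvTri ((r.count v : Int)))
          = (∑ v ∈ r.toFinset.erase x, pvTri ((r.count v : Int))) + pvTri ((r.count x : Int)) :=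
        (Finset.sum_erase_add _ _ hxT).symm
      rw [e1, e2, herase, hcnt x, if_pos rfl, pvTri_step]
      ring
    · have hxT : x ∉ r.toFinset := fun h => hx (List.mem_toFinset.mp h)
      have hT : (r ++ [x]).toFinset = insert x r.toFinset := by
        apply Finset.ext
        intro v
        simp
      rw [hT, Finset.sum_insert hxT]
      have h1 : (∑ v ∈ r.toFinset, pvTri (((r ++ [x]).count v : Int)))
          = ∑ v ∈ r.toFinset, pvTri ((r.count v : Int)) := by
        apply Finset.sum_congr rfl
        intro v hv
        have hvx : v ≠ x := fun e => hxT (e ▸ hv)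
        rw [hcnt v, if_neg hvx, add_zero]
      have hc0 : (r.count x : Int) = 0 := by
        simp [List.count_eq_zero_of_not_mem hx]
      rw [h1, hcnt x, if_pos rfl, hc0]
      have htri : pvTri (0 + 1) = 0 := by decide
      rw [htri]
      ring

theorem pvB_t (paths : List (List Int)) (t : Int) (c : Int) :
    ((paths.foldl (fun d p =>
        if p = [] then d
        else
          let v := pvPosB p t
          d.insert v (d.getD v 0 + 1)) PySem.Dict.empty).values.foldl
      (fun total k => total + PySem.Int.floordiv (k * (k - 1)) 2) c)
    = c + pvPairs (pvVals paths t) := by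
  rw [pvB_fold_eq, PySem.Dict.foldl_insert_getD_add_one_eq_counter]
  rw [PySem.Dict.values_eq_map_keys _ (PySem.Dict.nodup_keys_counter _) 0]
  rw [PySem.List.foldl_add, List.map_map]
  congr 1
  have hkeys := PySem.Dict.keys_counter (pvVals paths t)
  rw [hkeys]
  have hfun : ((fun k => PySem.Int.floordiv (k * (k - 1)) 2) ∘ fun k => (PySem.Dict.counter (pvVals paths t)).getD k 0)
      = fun v => pvTri (((pvVals paths t).count v : Int)) := by
    funext v
    simp [Function.comp, PySem.Dict.getD_counter, pvTri]
  rw [hfun]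
  rw [pvPairs_eq_finset_sum]
  rw [← List.sum_toFinset _ (PySem.Set.nodup_ofList _)]
  apply Finset.sum_congr
  · apply Finset.ext
    intro v
    simp [List.mem_toFinset, PySem.Set.mem_ofList]
  · intro v _; rfl

-- ===== VERDICT (by name: the statement is the Claim_ definition above) =====
theorem count_vertex_conflicts_spec : Claim_equal_count_vertex_conflicts := by
  intro paths _
  unfold Spec_count_vertex_conflicts count_vertex_conflicts count_vertex_conflicts_alt
  by_cases h : paths = []
  · simp [h]
  · simp only [if_neg h]
    apply PySem.List.foldl_congr_mem
    intro acc t ht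
    have ht0 : 0 ≤ t := by
      have := PySem.List.mem_pyRange_one.mp ht
      omega
    rw [pvA_t, pvPairsP_eq_pvPairs paths t ht0]
    exact (pvB_t paths t acc).symm
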